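-- pv_equiv track=rewrite | github.com/ParthChatupale/SAVIER---TRUST-LAYER | appsec_agent/core/config.py | _normalize_pipeline
-- ===== SOURCE A (Python) =====
-- def _normalize_pipeline(items: tuple[str, ...]) -> tuple[str, ...]:
--     normalized: list[str] = []
--     for item in items:
--         if item == "coding":
--             normalized.extend(["security_review", "quality_review", "performance_review"])
--             continue
--         if item == "security":
--             normalized.append("aggregation")
--             continue
--         normalized.append(item)
--     seen: set[str] = set()
--     result: list[str] = []
--     for item in normalized:
--         if item in seen:
--             continue
--         seen.add(item)
--         result.append(item)
--     return tuple(result)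
-- ===== SOURCE B (Python) =====
-- def _normalize_pipeline(items):
--     # Stack-driven rewriting machine: aliases are pushed back onto the work
--     # stack and re-consumed; dedup (keep first occurrences, in order) is
--     # delegated to dict.fromkeys instead of a hand-rolled seen-set loop.
--     stack = list(reversed(items))
--     out = []
--     while stack:
--         head = stack.pop()
--         if head == "coding":
--             stack.extend(("performance_review", "quality_review", "security_review"))
--         elif head == "security":
--             stack.append("aggregation")
--         else:
--             out.append(head)
--     return tuple(dict.fromkeys(out))
-- ===== Notes on version B (the rewrite author's own statement) =====
-- stated objective: alternative
-- what changed: Replaces A's staged if/elif expansion pass with a stack-driven rewriting loop that pushes alias expansions back onto the work stack, and replaces A's hand-rolled seen-set dedup loop with dict.fromkeys.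
import Mathlib
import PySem

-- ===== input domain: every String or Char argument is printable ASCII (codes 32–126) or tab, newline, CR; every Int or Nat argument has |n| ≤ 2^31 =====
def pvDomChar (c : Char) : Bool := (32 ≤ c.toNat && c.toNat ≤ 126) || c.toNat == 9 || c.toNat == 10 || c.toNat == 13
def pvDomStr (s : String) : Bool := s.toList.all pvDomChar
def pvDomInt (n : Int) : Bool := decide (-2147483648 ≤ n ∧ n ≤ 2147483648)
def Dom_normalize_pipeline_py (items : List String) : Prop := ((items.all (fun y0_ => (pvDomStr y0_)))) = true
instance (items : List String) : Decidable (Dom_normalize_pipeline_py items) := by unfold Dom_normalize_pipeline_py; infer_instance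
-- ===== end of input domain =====

-- B replaces A's staged if/elif expansion pass with a stack-driven rewriting loop
-- (aliases are pushed back onto the work stack) and A's seen-set dedup loop with
-- dict.fromkeys (objective: alternative).

-- ===== PORT A =====
def normalize_pipeline_py (items : List String) : List String :=
  let normalized : List String := items.foldl (fun acc item =>
    if item == "coding" then acc ++ ["security_review", "quality_review", "performance_review"]
    else if item == "security" then acc ++ ["aggregation"]
    else acc ++ [item]) []
  (normalized.foldl (fun (st : PySem.Set String × List String) item =>
      if item ∈ st.1 then st else (PySem.Set.add st.1 item, st.2 ++ [item]))
    ((PySem.Set.empty : PySem.Set String), ([] : List String))).2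

-- ===== PORT B =====
-- weight measure for the rewriting loop's termination (an alias is rewritten
-- into strictly lighter non-alias items)
def pvW (s : String) : Nat := if s == "coding" then 4 else if s == "security" then 2 else 1

-- the work stack is modelled with its top as the list head (Python pops from
-- the end of the reversed list, i.e. consumes the items front to back)
def pvGo : List String → List String → List String
  | [], out => out
  | head :: stack, out =>
    if head == "coding" then
      pvGo ("security_review" :: "quality_review" :: "performance_review" :: stack) out
    else if head == "security" then
      pvGo ("aggregation" :: stack) out
    else pvGo stack (out ++ [head])
termination_by todo _ => (todo.map pvW).sum
decreasing_by all_goals (simp_all [pvW]; try omega)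

-- dict.fromkeys(out) is PySem.List.dedup
def normalize_pipeline_py_alt (items : List String) : List String :=
  PySem.List.dedup (pvGo items [])

-- ===== PRECONDITION & SPEC =====
def Spec_normalize_pipeline_py (items : List String) (out : List String) : Prop := out = normalize_pipeline_py_alt items
instance (items : List String) (out : List String) : Decidable (Spec_normalize_pipeline_py items out) := by unfold Spec_normalize_pipeline_py; infer_instance

-- ===== CLAIM =====
def Claim_equal_normalize_pipeline_py : Prop := ∀ (items : List String), Dom_normalize_pipeline_py items → Spec_normalize_pipeline_py items (normalize_pipeline_py items)

-- ===== LEMMAS AND PROOFS =====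

-- A's if/elif expansion of one item
def pvExp (item : String) : List String :=
  if item == "coding" then ["security_review", "quality_review", "performance_review"]
  else if item == "security" then ["aggregation"]
  else [item]

-- A's first loop builds acc ++ flatMap of the per-item expansion
theorem expand_foldl (items : List String) (acc : List String) :
    items.foldl (fun acc item =>
      if item == "coding" then acc ++ ["security_review", "quality_review", "performance_review"]
      else if item == "security" then acc ++ ["aggregation"]
      else acc ++ [item]) acc = acc ++ items.flatMap pvExp := by
  induction items generalizing acc with
  | nil => simp
  | cons x xs ih =>
    simp only [List.foldl_cons, List.flatMap_cons, ih]
    unfold pvExp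
    split_ifs <;> simp

-- B's rewriting loop emits exactly the flatMap expansion
theorem pvGo_eq (todo out : List String) : pvGo todo out = out ++ todo.flatMap pvExp := by
  induction todo, out using pvGo.induct with
  | case1 out => simp [pvGo]
  | case2 head stack out h ih =>
    rw [pvGo, if_pos h]
    simp only [List.flatMap_cons, pvExp, h, if_pos]
    simpa using ih
  | case3 head stack out h1 h2 ih =>
    rw [pvGo, if_neg h1, if_pos h2]
    simp only [List.flatMap_cons, pvExp, h1, h2, if_pos]
    simpa using ih
  | case4 head stack out h1 h2 ih =>
    rw [pvGo, if_neg h1, if_neg h2]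
    simp [pvExp, h1, h2, ih]

-- A's seen-set dedup fold: with seen = result (as lists), the result is
-- PySem.Set.update of the accumulator, i.e. dedup relative to it
theorem dedup_foldl (l : List String) (s : PySem.Set String) :
    (l.foldl (fun (st : PySem.Set String × List String) item =>
        if item ∈ st.1 then st else (PySem.Set.add st.1 item, st.2 ++ [item])) (s, s)).2
      = PySem.Set.update s l := by
  induction l generalizing s with
  | nil => simp [PySem.Set.update]
  | cons x xs ih =>
    simp only [List.foldl_cons, PySem.Set.update, PySem.Set.add, PySem.Set.contains] at *
    by_cases hx : x ∈ s
    · simpa [hx] using ih s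
    · simpa [hx] using ih (s ++ [x])

-- ===== VERDICT =====
theorem normalize_pipeline_py_spec : Claim_equal_normalize_pipeline_py := by
  intro items _
  unfold Spec_normalize_pipeline_py normalize_pipeline_py normalize_pipeline_py_alt
  rw [expand_foldl, pvGo_eq]
  simp only [List.nil_append]
  exact (dedup_foldl (items.flatMap pvExp) PySem.Set.empty).trans
    (by simp [PySem.Set.update, PySem.Set.empty, PySem.List.dedup_eq_ofList, PySem.Set.ofList_eq_foldl])
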